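-- pv_equiv track=rewrite | github.com/SiyangShao/codes | ICPC/23Nowcoder/Day9/pai.py | check
-- ===== SOURCE A (Python) =====
-- def check(p):
--     for i in range(len(p)):
--         num = 0
--         for j in p:
--             if j < p[i]:
--                 num += 1
--         if i == num:
--             return False
--     return True
-- ===== SOURCE B (Python) =====
-- def check(p):
--     s = sorted(p)
--     for i, x in enumerate(p):
--         lo, hi = 0, len(s)
--         while lo < hi:
--             mid = (lo + hi) // 2
--             if s[mid] < x:
--                 lo = mid + 1
--             else:
--                 hi = mid
--         if lo == i:
--             return False
--     return True
-- ===== Notes on version B (the rewrite author's own statement) =====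
-- stated objective: faster
-- what changed: Replaces the inner linear count of strictly-smaller elements with one upfront sort plus a hand-written binary search (bisect_left) per element, O(n log n) instead of O(n^2).
import Mathlib
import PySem

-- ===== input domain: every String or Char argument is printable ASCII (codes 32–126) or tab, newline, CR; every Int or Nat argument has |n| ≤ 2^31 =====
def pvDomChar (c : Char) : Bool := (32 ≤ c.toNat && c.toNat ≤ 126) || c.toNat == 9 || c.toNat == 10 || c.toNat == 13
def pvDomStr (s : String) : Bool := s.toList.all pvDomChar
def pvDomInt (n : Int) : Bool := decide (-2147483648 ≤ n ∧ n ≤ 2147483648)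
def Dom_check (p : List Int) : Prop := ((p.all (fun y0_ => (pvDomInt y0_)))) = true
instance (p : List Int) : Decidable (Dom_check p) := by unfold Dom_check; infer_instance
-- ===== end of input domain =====

-- B replaces A's O(n^2) nested counting loop by one sort plus a binary search per element.

-- ===== PORT A =====
-- the outer 'for i in range(len(p))' loop; early 'return False' = stop with false
def checkALoop (p : List Int) : List Int → Bool
  | [] => true
  | i :: rest =>
      -- num = 0; for j in p: if j < p[i]: num += 1
      let num : Int := p.foldl (fun acc j => if j < PySem.List.pyGetD p i 0 then acc + 1 else acc) 0
      if i = num then false else checkALoop p rest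

def check (p : List Int) : Bool :=
  checkALoop p (PySem.List.pyRange 0 p.length 1)

-- ===== PORT B =====
-- the 'while lo < hi' binary search of Source B; lo and hi are Python ints that stay within 0..len(s),
-- so Nat carries them exactly ('(lo + hi) // 2' on nonnegatives is Nat division); s[mid] is always in range
def blLoop (s : List Int) (x : Int) (lo hi : Nat) : Nat :=
  if lo < hi then
    let mid := (lo + hi) / 2
    if s.getD mid 0 < x then blLoop s x (mid + 1) hi else blLoop s x lo mid
  else lo
termination_by hi - lo
decreasing_by all_goals omega

-- the 'for i, x in enumerate(p)' loop
def checkBLoop (s : List Int) : List (Int × Int) → Bool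
  | [] => true
  | (i, x) :: rest =>
      if (blLoop s x 0 s.length : Int) = i then false else checkBLoop s rest

def check_alt (p : List Int) : Bool :=
  let s := PySem.List.sorted p (fun y => y) false
  checkBLoop s (PySem.List.enumerate p 0)

-- ===== PRECONDITION & SPEC =====
def Spec_check (p : List Int) (out : Bool) : Prop := out = check_alt p
instance (p : List Int) (out : Bool) : Decidable (Spec_check p out) := by unfold Spec_check; infer_instance

-- ===== CLAIM (what is proved, stated in full; the proofs are below) =====
def Claim_equal_check : Prop := ∀ (p : List Int), Dom_check p → Spec_check p (check p)

-- ===== LEMMAS AND PROOFS =====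

-- A's inner loop counts the elements strictly below x
theorem foldlCount (p : List Int) (x : Int) :
    p.foldl (fun acc j => if j < x then acc + 1 else acc) 0
      = (p.countP (fun j => decide (j < x)) : Int) := by
  simpa using PySem.List.foldl_count_if (fun j : Int => decide (j < x)) p 0

-- a sorted list is monotone at indices
theorem getD_mono (s : List Int) (hs : s.Pairwise (· ≤ ·)) (i j : Nat)
    (hij : i ≤ j) (hj : j < s.length) : s.getD i 0 ≤ s.getD j 0 := by
  rw [List.getD_eq_getElem s 0 (by omega), List.getD_eq_getElem s 0 hj]
  rcases Nat.lt_or_ge i j with h | h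
  · exact (List.pairwise_iff_getElem.1 hs) i j (by omega) hj h
  · have : i = j := by omega
    subst this; rfl

-- binary-search invariant: if everything before lo is < x and nothing from hi on is,
-- the loop returns an index r with the same split at r
theorem blLoop_inv (s : List Int) (x : Int) (hs : s.Pairwise (· ≤ ·)) :
    ∀ (n lo hi : Nat), hi - lo ≤ n → lo ≤ hi → hi ≤ s.length →
      (∀ k, k < lo → s.getD k 0 < x) →
      (∀ k, hi ≤ k → k < s.length → ¬ s.getD k 0 < x) →
      lo ≤ blLoop s x lo hi ∧ blLoop s x lo hi ≤ hi ∧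
      (∀ k, k < blLoop s x lo hi → s.getD k 0 < x) ∧
      (∀ k, blLoop s x lo hi ≤ k → k < s.length → ¬ s.getD k 0 < x) := by
  intro n
  induction n with
  | zero =>
    intro lo hi hn hle hlen h1 h2
    have : lo = hi := by omega
    subst this
    rw [blLoop]; simp only [lt_irrefl, if_false]
    exact ⟨le_refl _, le_refl _, h1, h2⟩
  | succ n ih =>
    intro lo hi hn hle hlen h1 h2
    by_cases hlt : lo < hi
    · rw [blLoop]; simp only [if_pos hlt]
      have hmlo : lo ≤ (lo + hi) / 2 := by omega
      have hmhi : (lo + hi) / 2 < hi := by omega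
      by_cases hc : s.getD ((lo + hi) / 2) 0 < x
      · simp only [if_pos hc]
        refine (ih ((lo + hi) / 2 + 1) hi (by omega) (by omega) hlen ?_ h2).imp
          (fun h => by omega) (fun h => h)
        intro k hk
        rcases Nat.lt_or_ge k lo with h | h
        · exact h1 k h
        · exact lt_of_le_of_lt (getD_mono s hs k ((lo + hi) / 2) (by omega) (by omega)) hc
      · simp only [if_neg hc]
        refine (ih lo ((lo + hi) / 2) (by omega) (by omega) (by omega) h1 ?_).imp
          (fun h => h) (fun h => ⟨by omega, h.2⟩)
        intro k hk hklen hkx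
        exact hc (lt_of_le_of_lt (getD_mono s hs ((lo + hi) / 2) k hk hklen) hkx)
    · rw [blLoop]; simp only [if_neg hlt]
      exact ⟨le_refl _, hle, fun k hk => h1 k hk, fun k hk hkl => h2 k (by omega) hkl⟩

-- a predicate true exactly on a prefix has the prefix length as its count
theorem countP_of_split (s : List Int) (q : Int → Bool) (r : Nat) (hr : r ≤ s.length)
    (h1 : ∀ k, k < r → q (s.getD k 0)) (h2 : ∀ k, r ≤ k → k < s.length → ¬ q (s.getD k 0)) :
    s.countP q = r := by
  conv_lhs => rw [← List.take_append_drop r s]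
  rw [List.countP_append]
  have ht : (s.take r).countP q = (s.take r).length := by
    rw [List.countP_eq_length]
    intro a ha
    obtain ⟨i, hi, rfl⟩ := List.getElem_of_mem ha
    rw [List.getElem_take]
    have hir : i < r := by simp [List.length_take] at hi; omega
    have := h1 i hir
    rwa [List.getD_eq_getElem s 0 (by omega)] at this
  have hd : (s.drop r).countP q = 0 := by
    rw [List.countP_eq_zero]
    intro a ha
    obtain ⟨i, hi, rfl⟩ := List.getElem_of_mem ha
    rw [List.getElem_drop]
    have hlen : r + i < s.length := by simp [List.length_drop] at hi; omega
    have := h2 (r + i) (by omega) hlen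
    rwa [List.getD_eq_getElem s 0 hlen] at this
  rw [ht, hd, List.length_take]
  omega

-- B's binary search over the sorted list computes A's count of strictly-smaller elements
theorem blLoop_eq_countP (p : List Int) (x : Int) :
    blLoop (PySem.List.sorted p (fun y => y) false) x 0 (PySem.List.sorted p (fun y => y) false).length
      = p.countP (fun j => decide (j < x)) := by
  set s := PySem.List.sorted p (fun y => y) false with hsdef
  have hs : s.Pairwise (· ≤ ·) := PySem.List.sorted_pairwise p (fun y => y)
  have h := blLoop_inv s x hs s.length 0 s.length (by omega) (by omega) (le_refl _)
    (fun k hk => absurd hk (by omega)) (fun k hk hkl => absurd hkl (by omega))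
  obtain ⟨-, hle, hpre, hsuf⟩ := h
  have hcount : s.countP (fun j => decide (j < x)) = blLoop s x 0 s.length := by
    refine countP_of_split s _ _ hle ?_ ?_
    · intro k hk; exact decide_eq_true (hpre k hk)
    · intro k hk hkl h; exact hsuf k hk hkl (of_decide_eq_true h)
  rw [← hcount]
  exact List.Perm.countP_eq _ (PySem.List.sorted_perm p (fun y => y) false)

-- each early-return loop is an 'all' over its index list
theorem checkALoop_all (p : List Int) (l : List Int) :
    checkALoop p l = l.all (fun i =>
      !(decide (i = p.foldl (fun acc j => if j < PySem.List.pyGetD p i 0 then acc + 1 else acc) 0))) := by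
  induction l with
  | nil => rfl
  | cons i rest ih =>
    rw [checkALoop, List.all_cons, ih]
    generalize p.foldl (fun acc j => if j < PySem.List.pyGetD p i 0 then acc + 1 else acc) 0 = num
    by_cases h : i = num
    · simp [h]
    · simp

theorem checkBLoop_all (s : List Int) (l : List (Int × Int)) :
    checkBLoop s l = l.all (fun q => !(decide ((blLoop s q.2 0 s.length : Int) = q.1))) := by
  induction l with
  | nil => rfl
  | cons q rest ih =>
    obtain ⟨i, x⟩ := q
    rw [checkBLoop, List.all_cons, ih]
    by_cases h : (blLoop s x 0 s.length : Int) = i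
    · simp [h]
    · simp [h]

theorem check_eq (p : List Int) : check p = check_alt p := by
  rw [check, check_alt, checkALoop_all, checkBLoop_all, Bool.eq_iff_iff]
  simp only [List.all_eq_true, Bool.not_eq_eq_eq_not, Bool.not_true, decide_eq_false_iff_not]
  constructor
  · intro h q hq
    obtain ⟨k, hk, rfl⟩ := (PySem.List.mem_enumerate_iff p 0 _).1 hq
    have hm : (k : Int) ∈ PySem.List.pyRange 0 p.length 1 :=
      (PySem.List.mem_pyRange_one).2 ⟨by omega, by exact_mod_cast hk⟩
    have := h (k : Int) hm
    rw [foldlCount, PySem.List.pyGetD_natCast, List.getD_eq_getElem p 0 hk] at this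
    simp only [blLoop_eq_countP]
    intro hc
    omega
  · intro h i hi
    obtain ⟨h0, hn⟩ := (PySem.List.mem_pyRange_one).1 hi
    have hk : i.toNat < p.length := by omega
    have hq : ((0 : Int) + i.toNat, p[i.toNat]) ∈ PySem.List.enumerate p 0 :=
      (PySem.List.mem_enumerate_iff p 0 _).2 ⟨i.toNat, hk, rfl⟩
    have := h _ hq
    simp only [blLoop_eq_countP] at this
    have hi' : (i.toNat : Int) = i := by omega
    have hpg : PySem.List.pyGetD p i 0 = p[i.toNat] := by
      conv_lhs => rw [← hi']
      rw [PySem.List.pyGetD_natCast, List.getD_eq_getElem p 0 hk]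
    rw [foldlCount, hpg]
    intro hc
    omega

-- ===== VERDICT (by name: the statement is the Claim_ definition above) =====
theorem check_spec : Claim_equal_check := by
  intro p _
  show check p = check_alt p
  exact check_eq p
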